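-- pv_equiv track=rewrite | github.com/flashlin/pycore | common/input_tw.py | merge_eng_number_in_list
-- ===== SOURCE A (Python) =====
-- def merge_eng_number_in_list(lst):
--     eng = ""
--     new_list = []
--     for ch in lst:
--         if ch.startswith('#'):
--             eng += ch[1:]
--         else:
--             if eng != "":
--                 new_list.append(f"#{eng}")
--                 eng = ""
--             new_list.append(ch)
--     if eng != "":
--         new_list.append(f"#{eng}")
--     return new_list
-- ===== SOURCE B (Python) =====
-- def merge_eng_number_in_list(lst):
--     # Span-based: consume each maximal run of '#'-tokens at once, join its tails,
--     # emit '#'+joined only if non-empty; non-'#' tokens pass through unchanged.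
--     out = []
--     i = 0
--     n = len(lst)
--     while i < n:
--         if lst[i].startswith('#'):
--             joined = ''
--             while i < n and lst[i].startswith('#'):
--                 joined += lst[i][1:]
--                 i += 1
--             if joined:
--                 out.append('#' + joined)
--         else:
--             out.append(lst[i])
--             i += 1
--     return out
-- ===== Notes on version B (the rewrite author's own statement) =====
-- stated objective: alternative
-- what changed: Replaced A's single loop carrying a running accumulator and flush-on-flush state by a recursion that spans each maximal run of '#'-tokens, joins its tails at once (guarded against all-empty runs), and recurses on the remainder.
import Mathlib
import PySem

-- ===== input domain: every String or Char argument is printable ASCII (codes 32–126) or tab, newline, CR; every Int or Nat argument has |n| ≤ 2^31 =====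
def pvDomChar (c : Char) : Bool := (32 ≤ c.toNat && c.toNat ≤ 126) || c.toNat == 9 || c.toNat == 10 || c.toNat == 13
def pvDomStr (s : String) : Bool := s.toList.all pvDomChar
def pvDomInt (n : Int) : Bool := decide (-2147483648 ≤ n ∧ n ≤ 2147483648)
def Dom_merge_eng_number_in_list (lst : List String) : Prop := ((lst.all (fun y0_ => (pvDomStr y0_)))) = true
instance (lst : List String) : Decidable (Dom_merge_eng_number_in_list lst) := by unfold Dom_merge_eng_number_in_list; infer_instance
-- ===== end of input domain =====

-- B replaces A's running-accumulator loop by a span-based recursion that consumes each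
-- maximal run of '#'-tokens at once (objective: alternative decomposition, same cost).

-- ch.startswith('#')
def pvIsHash (ch : String) : Bool := PySem.Str.startswith ch "#"
-- ch[1:]
def pvTail1 (ch : String) : String := PySem.Str.slice ch (some 1) none

-- ===== PORT A =====
def mergeStepA (s : String × List String) (ch : String) : String × List String :=
  if pvIsHash ch then (s.1 ++ pvTail1 ch, s.2)
  else if s.1 ≠ "" then ("", s.2 ++ ["#" ++ s.1] ++ [ch])
  else (s.1, s.2 ++ [ch])

def merge_eng_number_in_list (lst : List String) : List String :=
  let r := lst.foldl mergeStepA ("", [])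
  if r.1 ≠ "" then r.2 ++ ["#" ++ r.1] else r.2

-- ===== PORT B =====
-- joined = ''; for ch in grp: joined += ch[1:]
def pvJoinTails (grp : List String) : String := grp.foldl (fun s ch => s ++ pvTail1 ch) ""

def merge_eng_number_in_list_alt : List String → List String
  | [] => []
  | h :: t =>
    if hh : pvIsHash h then
      let grp := (h :: t).takeWhile pvIsHash
      let rest := (h :: t).dropWhile pvIsHash
      let joined := pvJoinTails grp
      (if joined ≠ "" then ["#" ++ joined] else []) ++ merge_eng_number_in_list_alt rest
    else
      h :: merge_eng_number_in_list_alt t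
termination_by lst => lst.length
decreasing_by
  · simp [List.dropWhile, hh]
    exact List.length_dropWhile_le _ _
  · simp

-- ===== PRECONDITION & SPEC =====
def Spec_merge_eng_number_in_list (lst : List String) (out : List String) : Prop := out = merge_eng_number_in_list_alt lst
instance (lst : List String) (out : List String) : Decidable (Spec_merge_eng_number_in_list lst out) := by unfold Spec_merge_eng_number_in_list; infer_instance

-- ===== CLAIM (what is proved, stated in full; the proofs are below) =====
def Claim_equal_merge_eng_number_in_list : Prop := ∀ (lst : List String), Dom_merge_eng_number_in_list lst → Spec_merge_eng_number_in_list lst (merge_eng_number_in_list lst)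

-- ===== LEMMAS AND PROOFS =====

-- common functional specification: merged list with pending accumulator eng
def pvFspec : List String → String → List String
  | [], eng => if eng ≠ "" then ["#" ++ eng] else []
  | h :: t, eng =>
    if pvIsHash h then pvFspec t (eng ++ pvTail1 h)
    else (if eng ≠ "" then ["#" ++ eng, h] else [h]) ++ pvFspec t ""

theorem foldl_tail_init (grp : List String) (eng : String) :
    grp.foldl (fun s ch => s ++ pvTail1 ch) eng = eng ++ pvJoinTails grp := by
  induction grp generalizing eng with
  | nil => simp [pvJoinTails]
  | cons h t ih =>
    simp only [List.foldl_cons, pvJoinTails]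
    rw [ih (eng ++ pvTail1 h), ih ("" ++ pvTail1 h)]
    simp [String.append_assoc]

theorem A_eq_fspec (lst : List String) : ∀ (eng : String) (acc : List String),
    (let r := lst.foldl mergeStepA (eng, acc)
     if r.1 ≠ "" then r.2 ++ ["#" ++ r.1] else r.2) = acc ++ pvFspec lst eng := by
  induction lst with
  | nil =>
    intro eng acc
    simp only [List.foldl_nil, pvFspec]
    split_ifs <;> simp
  | cons h t ih =>
    intro eng acc
    simp only [List.foldl_cons, pvFspec, mergeStepA]
    by_cases hh : pvIsHash h
    · simp [hh, ih]
    · by_cases he : eng = ""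
      · simp [hh, he, ih]
      · simp [hh, he, ih]

theorem fspec_span (lst : List String) : ∀ (eng : String),
    (if (lst.takeWhile pvIsHash).foldl (fun s ch => s ++ pvTail1 ch) eng ≠ ""
       then ["#" ++ (lst.takeWhile pvIsHash).foldl (fun s ch => s ++ pvTail1 ch) eng] else [])
      ++ pvFspec (lst.dropWhile pvIsHash) "" = pvFspec lst eng := by
  induction lst with
  | nil => intro eng; simp [pvFspec]
  | cons h t ih =>
    intro eng
    by_cases hh : pvIsHash h
    · simp only [List.takeWhile_cons, List.dropWhile_cons, hh, if_pos, List.foldl_cons]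
      rw [ih (eng ++ pvTail1 h)]
      simp [pvFspec, hh]
    · simp only [List.takeWhile_cons, List.dropWhile_cons, hh]
      simp only [Bool.false_eq_true, if_false, List.foldl_nil]
      conv_rhs => rw [pvFspec]
      rw [pvFspec]
      simp only [hh, Bool.false_eq_true, if_false]
      by_cases he : eng = "" <;> simp [he]
  
theorem alt_eq_fspec : ∀ (n : ℕ) (lst : List String), lst.length ≤ n →
    merge_eng_number_in_list_alt lst = pvFspec lst "" := by
  intro n
  induction n with
  | zero =>
    intro lst hl
    have : lst = [] := List.eq_nil_of_length_eq_zero (Nat.le_zero.mp hl)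
    subst this
    simp [merge_eng_number_in_list_alt, pvFspec]
  | succ m ih =>
    intro lst hl
    match lst with
    | [] => simp [merge_eng_number_in_list_alt, pvFspec]
    | h :: t =>
      rw [merge_eng_number_in_list_alt]
      by_cases hh : pvIsHash h
      · simp only [hh, dif_pos]
        rw [ih ((h :: t).dropWhile pvIsHash)
            (by simp only [List.dropWhile_cons, hh, if_pos]
                exact Nat.le_trans (List.length_dropWhile_le _ _) (Nat.le_of_succ_le_succ hl))]
        have := fspec_span (h :: t) ""
        rw [← this]
        rw [foldl_tail_init]
        simp
      · simp only [hh, dif_neg, Bool.false_eq_true, not_false_iff]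
        rw [ih t (Nat.le_of_succ_le_succ hl)]
        conv_rhs => rw [pvFspec]
        simp [hh]

-- ===== VERDICT (by name: the statement is the Claim_ definition above) =====
theorem merge_eng_number_in_list_spec : Claim_equal_merge_eng_number_in_list := by
  intro lst _
  unfold Spec_merge_eng_number_in_list
  rw [alt_eq_fspec lst.length lst (Nat.le_refl _)]
  simpa [merge_eng_number_in_list] using A_eq_fspec lst "" []
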